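-- pv_equiv track=rewrite | github.com/jemtca/CodingBat | Python/String-2/xy_balance.py | xy_balance
-- ===== SOURCE A (Python) =====
-- def xy_balance(str):
--     b = True
--     y_pos = 0
--     i = len(str) - 1
--     found = False
--
--     while (i >= 0 and not found):
--         if str[i] == 'y':
--             y_pos = i
--             found = True
--         i -= 1
--
--     if 'x' in str[y_pos:]:
--         b = False
--
--     return b
-- ===== SOURCE B (Python) =====
-- def xy_balance(str):
--     balanced = True
--     for ch in str:
--         if ch == 'x':
--             balanced = False
--         elif ch == 'y':
--             balanced = True
--     return balanced
-- ===== Notes on version B (the rewrite author's own statement) =====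
-- stated objective: idiomatic
-- what changed: Single forward pass maintaining one boolean flag instead of scanning backward for the last 'y' and then searching the tail slice for 'x'.
import Mathlib
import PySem

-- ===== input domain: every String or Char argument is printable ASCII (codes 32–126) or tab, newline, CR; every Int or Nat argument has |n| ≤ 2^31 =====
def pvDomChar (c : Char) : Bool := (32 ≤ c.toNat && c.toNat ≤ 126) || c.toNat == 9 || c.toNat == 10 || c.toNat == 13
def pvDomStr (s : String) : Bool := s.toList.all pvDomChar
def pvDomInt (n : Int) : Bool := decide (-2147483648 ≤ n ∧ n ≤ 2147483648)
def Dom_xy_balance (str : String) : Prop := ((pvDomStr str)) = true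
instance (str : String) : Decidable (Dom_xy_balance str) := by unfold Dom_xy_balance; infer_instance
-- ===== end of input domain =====

-- B replaces A's backward scan for the last 'y' plus a slice search for 'x' by a single
-- forward pass maintaining one boolean flag (idiomatic; same O(n) cost).

-- ===== PORT A =====
-- A's while loop: i runs from len-1 down; ported with fuel k = i+1 (k = 0 means i < 0).
-- Returns (y_pos, found) exactly as the loop leaves them.
def xyA_loop (cs : List Char) : Nat → Nat → Bool → Nat × Bool
  | 0, y_pos, found => (y_pos, found)
  | k + 1, y_pos, found =>
      if found then (y_pos, found)
      else if cs.getD k ' ' == 'y' then xyA_loop cs k k true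
      else xyA_loop cs k y_pos found

def xy_balance (str : String) : Bool :=
  let cs := str.toList
  let r := xyA_loop cs cs.length 0 false
  -- 'x' in str[y_pos:] : slice from a nonnegative in-range index = drop (PySem.List.slice_from_natCast)
  if (cs.drop r.1).contains 'x' then false else true

-- ===== PORT B =====
def xyB_step (b : Bool) (c : Char) : Bool :=
  if c == 'x' then false else if c == 'y' then true else b

def xy_balance_alt (str : String) : Bool :=
  str.toList.foldl xyB_step true

-- ===== PRECONDITION & SPEC =====
def Spec_xy_balance (str : String) (out : Bool) : Prop := out = xy_balance_alt str
instance (str : String) (out : Bool) : Decidable (Spec_xy_balance str out) := by unfold Spec_xy_balance; infer_instance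

-- ===== CLAIM (what is proved, stated in full; the proofs are below) =====
def Claim_equal_xy_balance : Prop := ∀ (str : String), Dom_xy_balance str → Spec_xy_balance str (xy_balance str)

-- ===== LEMMAS AND PROOFS =====

-- A's loop only looks at indices < k, so appending past k does not change it
theorem xyA_loop_append (cs : List Char) (c : Char) (k y f : _) (hk : k ≤ cs.length) :
    xyA_loop (cs ++ [c]) k y f = xyA_loop cs k y f := by
  induction k generalizing y f with
  | zero => rfl
  | succ n ih =>
      have hn : n < cs.length := by omega
      have hget : (cs ++ [c]).getD n ' ' = cs.getD n ' ' := by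
        simp [List.getD, List.getElem?_append_left hn]
      simp only [xyA_loop, hget]
      split_ifs <;> simp [ih, hn.le]

-- the loop's y_pos stays within bounds
theorem xyA_loop_le (cs : List Char) (k y : Nat) (f : Bool) (hk : k ≤ cs.length)
    (hy : y ≤ cs.length) : (xyA_loop cs k y f).1 ≤ cs.length := by
  induction k generalizing y f with
  | zero => simpa [xyA_loop]
  | succ n ih =>
      simp only [xyA_loop]
      split_ifs with h1 h2
      · simpa
      · exact ih n true (by omega) (by omega)
      · exact ih y f (by omega) hy

theorem xy_core (cs : List Char) :
    (if ((cs.drop (xyA_loop cs cs.length 0 false).1).contains 'x') then false else true)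
      = cs.foldl xyB_step true := by
  induction cs using List.reverseRecOn with
  | nil => rfl
  | append_singleton cs c ih =>
      have hlen : (cs ++ [c]).length = cs.length + 1 := by simp
      by_cases hy : c = 'y'
      · subst hy
        have hdone : ∀ (l : List Char) (k y : Nat), xyA_loop l k y true = (y, true) := by
          intro l k y; cases k <;> simp [xyA_loop]
        have : xyA_loop (cs ++ ['y']) (cs.length + 1) 0 false = (cs.length, true) := by
          simp [xyA_loop, List.getD, List.getElem?_append_right (le_refl cs.length), hdone]
        rw [hlen, this]
        simp [List.foldl_append, xyB_step, List.drop_append_of_le_length (le_refl cs.length)]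
      · have hget : (cs ++ [c]).getD cs.length ' ' = c := by
          simp [List.getD, List.getElem?_append_right (le_refl cs.length)]
        have hstep : xyA_loop (cs ++ [c]) (cs.length + 1) 0 false
            = xyA_loop cs cs.length 0 false := by
          simp only [xyA_loop, hget]
          simp only [beq_iff_eq, if_neg hy, Bool.false_eq_true, if_false]
          exact xyA_loop_append cs c cs.length 0 false (le_refl _)
        have hyle : (xyA_loop cs cs.length 0 false).1 ≤ cs.length :=
          xyA_loop_le cs cs.length 0 false (le_refl _) (by omega)
        rw [hlen, hstep, List.drop_append_of_le_length hyle]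
        by_cases hx : c = 'x'
        · subst hx; simp [List.foldl_append, xyB_step]
        · simp only [List.foldl_append, List.foldl_cons, List.foldl_nil]
          rw [show xyB_step (cs.foldl xyB_step true) c = cs.foldl xyB_step true by
            simp [xyB_step, hx, hy]]
          rw [← ih]
          have : (List.drop (xyA_loop cs cs.length 0 false).1 cs ++ [c]).contains 'x'
              = (List.drop (xyA_loop cs cs.length 0 false).1 cs).contains 'x' := by
            simp [eq_comm, hx]
          rw [this]

-- ===== VERDICT (by name: the statement is the Claim_ definition above) =====
theorem xy_balance_spec : Claim_equal_xy_balance := by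
  intro str _
  unfold Spec_xy_balance xy_balance xy_balance_alt
  exact xy_core str.toList
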